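-- pv_equiv track=rewrite | github.com/89million/proj_con | app/voting.py | _bracket_seeding_order
-- ===== SOURCE A (Python) =====
-- def _bracket_seeding_order(n: int) -> list[int]:
--     """Standard tournament bracket seeding order for *n* slots (power of 2).
--
--     Returns 1-indexed seeds where adjacent pairs form matchups.
--     E.g. n=8 → [1, 8, 4, 5, 2, 7, 3, 6]
--       → matchups: 1v8, 4v5, 2v7, 3v6
--     This guarantees #1 and #2 are in opposite halves and can only meet in the final.
--     """
--     order = [1]
--     size = 1
--     while size < n:
--         size *= 2
--         new_order = []
--         for s in order:
--             new_order.append(s)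
--             new_order.append(size + 1 - s)
--         order = new_order
--     return order
-- ===== SOURCE B (Python) =====
-- def _bracket_seeding_order(n: int) -> list[int]:
--     m = 0
--     while (1 << m) < n:
--         m += 1
--     res = []
--     for k in range(1 << m):
--         v = 1
--         for t in range(1, m + 1):
--             if (k >> (m - t)) & 1:
--                 v = (1 << t) + 1 - v
--         res.append(v)
--     return res
-- ===== Notes on version B (the rewrite author's own statement) =====
-- stated objective: alternative
-- what changed: B computes each position's seed independently from its index bits (MSB-first reflections), replacing A's repeated whole-list rebuild by reflection at each doubling round.
import Mathlib
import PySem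

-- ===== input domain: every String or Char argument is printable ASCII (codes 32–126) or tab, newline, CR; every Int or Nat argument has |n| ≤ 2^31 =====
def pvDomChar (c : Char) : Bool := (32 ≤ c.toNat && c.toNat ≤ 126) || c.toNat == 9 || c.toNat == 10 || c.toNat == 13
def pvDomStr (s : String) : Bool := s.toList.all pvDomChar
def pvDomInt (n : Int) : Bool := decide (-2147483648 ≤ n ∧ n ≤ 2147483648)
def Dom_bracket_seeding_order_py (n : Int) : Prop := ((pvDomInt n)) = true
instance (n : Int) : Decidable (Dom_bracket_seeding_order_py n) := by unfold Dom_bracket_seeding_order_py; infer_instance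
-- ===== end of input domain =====

-- B replaces A's repeated whole-list reflection by an independent per-index bit
-- computation of each seed (objective: alternative decomposition, same cost).

-- ===== PORT A =====
-- A's while-loop: `size` starts at 1 and doubles while size < n; each round the
-- list is rebuilt by appending s and (new size)+1-s for each s.  The invariant
-- 1 ≤ size is carried only for termination.
def aLoop (n : Int) (size : Int) (order : List Int) (hs : 1 ≤ size) : List Int :=
  if h : size < n then
    aLoop n (size * 2)
      (order.foldl (fun acc s => acc ++ [s, size * 2 + 1 - s]) []) (by omega)
  else order
termination_by (n - size).toNat
decreasing_by omega

def bracket_seeding_order_py (n : Int) : List Int :=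
  aLoop n 1 [1] (by norm_num)

-- ===== PORT B =====
-- Source B's first loop: m = 0; while (1 << m) < n: m += 1.  Python's 1 << m on a
-- nonnegative m is exactly (2:Int)^m.
def bFindM (n : Int) (m : Nat) : Nat :=
  if h : (2 : Int) ^ m < n then bFindM n (m + 1) else m
termination_by (n - 2 ^ m).toNat
decreasing_by
  have h1 : (1 : Int) ≤ 2 ^ m := one_le_pow₀ (by norm_num)
  omega

-- Source B's inner loop over t = 1..m: v := (1<<t)+1-v when bit (m-t) of k is set.
-- k is always nonnegative in Source B (it comes from range), so Nat `>>>`/`% 2`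
-- are exact for Python's `>>` and `& 1`.
def bSeed (m k : Nat) : Int :=
  (List.range m).foldl
    (fun v i =>
      if (k >>> (m - (i + 1))) % 2 = 1 then (2 : Int) ^ (i + 1) + 1 - v else v) 1

def bracket_seeding_order_py_alt (n : Int) : List Int :=
  (List.range (2 ^ bFindM n 0)).map (fun k => bSeed (bFindM n 0) k)

-- ===== PRECONDITION & SPEC =====
def Spec_bracket_seeding_order_py (n : Int) (out : List Int) : Prop := out = bracket_seeding_order_py_alt n
instance (n : Int) (out : List Int) : Decidable (Spec_bracket_seeding_order_py n out) := by unfold Spec_bracket_seeding_order_py; infer_instance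

-- ===== CLAIM (what is proved, stated in full; the proofs are below) =====
def Claim_equal_bracket_seeding_order_py : Prop := ∀ (n : Int), Dom_bracket_seeding_order_py n → Spec_bracket_seeding_order_py n (bracket_seeding_order_py n)

-- ===== LEMMAS AND PROOFS =====

-- Closed characterisation of A's list after j doubling rounds.
def ordA : Nat → List Int
  | 0 => [1]
  | j + 1 => (ordA j).flatMap (fun s => [s, 2 ^ (j + 1) + 1 - s])

theorem foldl_app (f : Int → List Int) :
    ∀ (l : List Int) (init : List Int),
      l.foldl (fun acc s => acc ++ f s) init = init ++ l.flatMap f := by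
  intro l
  induction l with
  | nil => simp
  | cons a t ih => intro init; simp [List.foldl_cons, ih]

theorem foldl_congr' {α β : Type} :
    ∀ (l : List α) (f g : β → α → β) (init : β),
      (∀ v a, a ∈ l → f v a = g v a) → l.foldl f init = l.foldl g init := by
  intro l
  induction l with
  | nil => intros; rfl
  | cons a t ih =>
      intro f g init h
      simp only [List.foldl_cons]
      rw [h init a (by simp)]
      exact ih f g _ (fun v a' ha' => h v a' (by simp [ha']))

theorem aLoop_eq (n : Int) (j : Nat) (h : 1 ≤ (2 : Int) ^ j) :
    aLoop n (2 ^ j) (ordA j) h = ordA (bFindM n j) := by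
  rw [aLoop, bFindM]
  split
  · have hp : (2 : Int) ^ j * 2 = 2 ^ (j + 1) := (pow_succ 2 j).symm
    have : ((ordA j).foldl (fun acc s => acc ++ [s, 2 ^ j * 2 + 1 - s]) []) = ordA (j + 1) := by
      rw [foldl_app (fun s => [s, 2 ^ j * 2 + 1 - s]) (ordA j) []]
      simp only [List.nil_append, ordA, hp]
    rw [hp] at this
    simp only [hp]
    rw [this]
    exact aLoop_eq n (j + 1) _
  · rfl
termination_by (n - 2 ^ j).toNat
decreasing_by omega

theorem bSeed_succ (m k : Nat) :
    bSeed (m + 1) k =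
      if k % 2 = 1 then 2 ^ (m + 1) + 1 - bSeed m (k / 2) else bSeed m (k / 2) := by
  unfold bSeed
  rw [List.range_succ, List.foldl_append]
  have hcongr :
      (List.range m).foldl
        (fun v i => if (k >>> (m + 1 - (i + 1))) % 2 = 1 then (2:Int) ^ (i + 1) + 1 - v else v) 1 =
      (List.range m).foldl
        (fun v i => if ((k / 2) >>> (m - (i + 1))) % 2 = 1 then (2:Int) ^ (i + 1) + 1 - v else v) 1 := by
    apply foldl_congr'
    intro v i hi
    have hi' : i < m := List.mem_range.mp hi
    have h1 : m + 1 - (i + 1) = 1 + (m - (i + 1)) := by omega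
    rw [h1, Nat.shiftRight_add, Nat.shiftRight_one]
  rw [hcongr]
  simp only [List.foldl_cons, List.foldl_nil, Nat.sub_self,
    Nat.shiftRight_zero]

theorem map_range_double {g : Nat → Int} :
    ∀ (R : Nat), (List.range (2 * R)).map g =
      (List.range R).flatMap (fun q => [g (2 * q), g (2 * q + 1)]) := by
  intro R
  induction R with
  | zero => rfl
  | succ R ih =>
      have : 2 * (R + 1) = (2 * R + 1) + 1 := by ring
      rw [this, List.range_succ, List.range_succ, List.range_succ, List.flatMap_append]
      simp [ih]

theorem bMap (m : Nat) : (List.range (2 ^ m)).map (fun k => bSeed m k) = ordA m := by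
  induction m with
  | zero => rfl
  | succ m ih =>
      have hp : (2 : Nat) ^ (m + 1) = 2 * 2 ^ m := by ring
      rw [hp, map_range_double]
      simp only [ordA]
      rw [← ih, List.flatMap_map]
      congr 1
      funext q
      have h0 : bSeed (m + 1) (2 * q) = bSeed m q := by
        rw [bSeed_succ]; simp
      have h1 : bSeed (m + 1) (2 * q + 1) = 2 ^ (m + 1) + 1 - bSeed m q := by
        rw [bSeed_succ]
        have : (2 * q + 1) % 2 = 1 := by omega
        have hd : (2 * q + 1) / 2 = q := by omega
        simp [this, hd]
      simp [h0, h1]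

-- ===== VERDICT (by name: the statement is the Claim_ definition above) =====
theorem bracket_seeding_order_py_spec : Claim_equal_bracket_seeding_order_py := by
  intro n _
  unfold Spec_bracket_seeding_order_py bracket_seeding_order_py bracket_seeding_order_py_alt
  have h := aLoop_eq n 0 (by norm_num)
  simp only [pow_zero, ordA] at h
  rw [h, bMap]
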